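-- pv_equiv track=rewrite | github.com/Zhakupovaadiya/homework- | lab 1/main.py | max_subbary_sum
-- ===== SOURCE A (Python) =====
-- def max_subbary_sum(nums, k):
--     max_sum = None
--     n = len(nums)
--     for i in range(n-k+1):
--         window = nums[i:i+k]
--         valid = True
--         for x in window:
--             if x<=0:
--                 valid = False
--                 break
--         if valid:
--             current_sum = 0
--             for x in window:
--                 current_sum += x
--             if max_sum is None or current_sum > max_sum:
--                 max_sum = current_sum
--     return max_sum
-- ===== SOURCE B (Python) =====
-- def max_subbary_sum(nums, k):
--     best = None
--     s = 0      # sum of the current window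
--     bad = 0    # how many non-positive elements the current window holds
--     for i, x in enumerate(nums):
--         s += x
--         if x <= 0:
--             bad += 1
--         if i >= k:
--             y = nums[i - k]
--             s -= y
--             if y <= 0:
--                 bad -= 1
--         if i >= k - 1 and bad == 0:
--             if best is None or s > best:
--                 best = s
--     return best
-- ===== Notes on version B (the rewrite author's own statement) =====
-- stated objective: faster
-- what changed: Replaces the per-start rescan of each length-k slice (validity scan plus sum loop) by a single sliding-window pass that maintains a running sum and a count of non-positive elements.
-- outside the precondition, e.g. on max_subbary_sum([], 0): A returns 0, B returns None; on max_subbary_sum([5], -1): A returns 0, B raises IndexError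
import Mathlib
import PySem

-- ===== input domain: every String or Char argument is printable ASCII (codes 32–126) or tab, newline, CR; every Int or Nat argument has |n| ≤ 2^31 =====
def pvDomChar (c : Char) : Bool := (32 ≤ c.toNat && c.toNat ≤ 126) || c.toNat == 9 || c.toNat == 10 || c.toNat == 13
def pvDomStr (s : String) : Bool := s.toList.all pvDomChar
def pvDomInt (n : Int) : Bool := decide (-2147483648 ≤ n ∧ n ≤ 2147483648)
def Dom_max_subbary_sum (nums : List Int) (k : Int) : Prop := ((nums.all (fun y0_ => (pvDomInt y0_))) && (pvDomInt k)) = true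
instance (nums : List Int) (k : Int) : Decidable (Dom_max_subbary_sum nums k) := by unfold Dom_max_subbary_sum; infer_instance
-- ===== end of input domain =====

-- B replaces A's per-start rescan of every length-k slice by one sliding-window pass
-- (running sum + count of non-positive elements); objective: faster (asymptotic, O(n*k) → O(n)).

-- ===== PORT A =====
-- A's inner `for x in window: if x<=0: valid=False; break` loop, as structural recursion.
def allPosA : List Int → Bool
  | [] => true
  | x :: xs => if x ≤ 0 then false else allPosA xs

-- A's loop body for one window (validity scan, then explicit summing loop, then max update).
def stepA (max_sum : Option Int) (window : List Int) : Option Int :=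
  if allPosA window then
    let current_sum := window.foldl (fun acc x => acc + x) 0
    match max_sum with
    | none => some current_sum
    | some m => if current_sum > m then some current_sum else max_sum
  else max_sum

def max_subbary_sum (nums : List Int) (k : Int) : Option Int :=
  let n : Int := nums.length
  (PySem.List.pyRange 0 (n - k + 1) 1).foldl
    (fun max_sum i => stepA max_sum (PySem.List.slice nums (some i) (some (i + k)))) none

-- ===== PORT B =====
-- B's loop body; state = (best, running sum, count of non-positive elements in the window).
def bStep (nums : List Int) (k : Int) (st : Option Int × Int × Int) (p : Int × Int) :
    Option Int × Int × Int :=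
  let best := st.1
  let s := st.2.1 + p.2
  let bad := if p.2 ≤ 0 then st.2.2 + 1 else st.2.2
  let sb :=
    if p.1 ≥ k then
      -- y := nums[i-k]; under Pre_ (1 ≤ k) the index is in range, Python never raises here
      let y := (PySem.List.pyGet? nums (p.1 - k)).getD 0
      (s - y, if y ≤ 0 then bad - 1 else bad)
    else (s, bad)
  let best :=
    if p.1 ≥ k - 1 ∧ sb.2 = 0 then
      match best with
      | none => some sb.1
      | some b => if sb.1 > b then some sb.1 else best
    else best
  (best, sb.1, sb.2)

def max_subbary_sum_alt (nums : List Int) (k : Int) : Option Int :=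
  ((PySem.List.enumerate nums 0).foldl (bStep nums k) (none, 0, 0)).1

-- ===== PRECONDITION & SPEC =====
-- Pre_ excludes non-positive window lengths k ≤ 0, a meaningless corner on which A's empty
-- slices make it return the accidental value 0 (even for empty nums) while B's sliding
-- window naturally returns None or raises; no behaviour there is specified by the task.
def Pre_max_subbary_sum (nums : List Int) (k : Int) : Prop := 1 ≤ k
instance (nums : List Int) (k : Int) : Decidable (Pre_max_subbary_sum nums k) := by
  unfold Pre_max_subbary_sum; infer_instance
def pvWitness_max_subbary_sum : List Int × Int := ([1, -2, 3, 4], 2)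

def Spec_max_subbary_sum (nums : List Int) (k : Int) (out : Option Int) : Prop := out = max_subbary_sum_alt nums k
instance (nums : List Int) (k : Int) (out : Option Int) : Decidable (Spec_max_subbary_sum nums k out) := by unfold Spec_max_subbary_sum; infer_instance

-- ===== CLAIM (what is proved, stated in full; the proofs are below) =====
def Claim_equal_max_subbary_sum : Prop := ∀ (nums : List Int) (k : Int), Dom_max_subbary_sum nums k → Pre_max_subbary_sum nums k → Spec_max_subbary_sum nums k (max_subbary_sum nums k)

-- ===== LEMMAS AND PROOFS =====

-- the reference value: A's fold expressed over the m+1-k windows of the first m elements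
def bigB (nums : List Int) (k' m : Nat) : Option Int :=
  (List.range (m + 1 - k')).foldl (fun b j => stepA b ((nums.drop j).take k')) none

theorem foldl_add_int (l : List Int) (init : Int) :
    l.foldl (fun acc x => acc + x) init = init + l.sum := by
  induction l generalizing init with
  | nil => simp
  | cons x xs ih => simp [List.foldl_cons, ih, List.sum_cons]; ring

theorem allPosA_iff (l : List Int) : allPosA l = true ↔ l.countP (fun x => decide (x ≤ 0)) = 0 := by
  induction l with
  | nil => simp [allPosA]
  | cons x xs ih =>
    by_cases h : x ≤ 0 <;> simp [allPosA, h, ih]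

theorem enumerate_append_singleton (l : List Int) (a : Int) (s : Int) :
    PySem.List.enumerate (l ++ [a]) s = PySem.List.enumerate l s ++ [(s + l.length, a)] := by
  induction l generalizing s with
  | nil => simp [PySem.List.enumerate_nil, PySem.List.enumerate_cons]
  | cons x xs ih =>
    simp [PySem.List.enumerate_cons, ih]
    ring

-- B's best-update (running sum + zero bad-count test) coincides with A's per-window step
theorem update_eq (best : Option Int) (w : List Int) :
    (if ((w.countP (fun x => decide (x ≤ 0)) : Nat) : Int) = 0 then
       (match best with
        | none => some w.sum
        | some b => if w.sum > b then some w.sum else best)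
     else best) = stepA best w := by
  by_cases h : allPosA w = true
  · have hc := (allPosA_iff w).mp h
    simp [stepA, h, hc, foldl_add_int]
  · have hc : w.countP (fun x => decide (x ≤ 0)) ≠ 0 := fun hc => h ((allPosA_iff w).mpr hc)
    simp [stepA, h, hc]

theorem invariant (nums : List Int) (k' : Nat) (hk : 1 ≤ k') (m : Nat) (hm : m ≤ nums.length) :
    (PySem.List.enumerate (nums.take m) 0).foldl (bStep nums (k' : Int)) (none, 0, 0) =
      (bigB nums k' m,
       ((nums.take m).drop (m - k')).sum,
       (((nums.take m).drop (m - k')).countP (fun x => decide (x ≤ 0)) : Int)) := by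
  induction m with
  | zero =>
    have h0 : 0 + 1 - k' = 0 := by omega
    simp [bigB, h0, PySem.List.enumerate_nil]
  | succ m ih =>
    have hm' : m < nums.length := by omega
    have htake : nums.take (m + 1) = nums.take m ++ [nums[m]] := by
      rw [List.take_add_one]; simp [List.getElem?_eq_getElem hm']
    rw [htake, enumerate_append_singleton, List.foldl_append, ih (by omega)]
    have hlen : ((nums.take m).length : Int) = (m : Int) := by
      simp [List.length_take]; omega
    rw [hlen]
    by_cases hcase : k' ≤ m
    · -- window is full: one element leaves, one enters
      have hdlt : m - k' < nums.length := by omega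
      have hyget : PySem.List.pyGet? nums ((0 : Int) + (m : Int) - (k' : Int)) =
          some nums[m - k'] := by
        have he : (0 : Int) + (m : Int) - (k' : Int) = ((m - k' : Nat) : Int) := by omega
        rw [he, PySem.List.pyGet?_natCast, List.getElem?_eq_getElem hdlt]
      have hWm : (nums.take m).drop (m - k') =
          nums[m - k'] :: (nums.drop (m - k' + 1)).take (k' - 1) := by
        rw [List.drop_take, List.drop_eq_getElem_cons hdlt]
        have he : m - (m - k') = (k' - 1) + 1 := by omega
        rw [he, List.take_succ_cons]
      have hWm1 : (nums.take m ++ [nums[m]]).drop (m + 1 - k') =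
          (nums.drop (m - k' + 1)).take (k' - 1) ++ [nums[m]] := by
        rw [← htake, List.drop_take]
        have h1 : m + 1 - k' = (m - k') + 1 := by omega
        have h2 : m + 1 - ((m - k') + 1) = (k' - 1) + 1 := by omega
        rw [h1, h2, List.take_add_one]
        have h3 : (nums.drop (m - k' + 1))[k' - 1]? = some nums[m] := by
          rw [List.getElem?_drop]
          have he : m - k' + 1 + (k' - 1) = m := by omega
          rw [he, List.getElem?_eq_getElem hm']
        rw [h3]; rfl
      have hge : (0 : Int) + (m : Int) ≥ (k' : Int) := by omega
      have hge1 : (0 : Int) + (m : Int) ≥ (k' : Int) - 1 := by omega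
      have hbig : bigB nums k' (m + 1) =
          stepA (bigB nums k' m) ((nums.drop (m - k' + 1)).take (k' - 1) ++ [nums[m]]) := by
        unfold bigB
        have hrange : m + 1 + 1 - k' = (m + 1 - k') + 1 := by omega
        have hd1 : m + 1 - k' = (m - k') + 1 := by omega
        rw [hrange, List.range_succ, List.foldl_append, List.foldl_cons, List.foldl_nil, hd1]
        congr 1
        have he : (k' - 1) + 1 = k' := by omega
        have ht := List.take_add_one (l := nums.drop (m - k' + 1)) (i := k' - 1)
        rw [he] at ht
        have he2 : m - k' + 1 + (k' - 1) = m := by omega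
        rw [ht, List.getElem?_drop, he2, List.getElem?_eq_getElem hm']
        rfl
      simp only [List.foldl_cons, List.foldl_nil, bStep, hyget, if_pos hge,
        Option.getD_some, hWm, hWm1, hbig]
      rw [← update_eq]
      rw [Prod.mk.injEq, Prod.mk.injEq]
      refine ⟨?_, ?_, ?_⟩
      · cases hb : bigB nums k' m <;>
        · simp only [List.countP_cons, List.countP_append, List.sum_cons, List.sum_append,
            List.countP_nil, List.sum_nil, decide_eq_true_eq, hge1, true_and]
          split_ifs <;> first
            | rfl
            | (exfalso; omega)
            | (simp only [Option.some.injEq]; push_cast; ring)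
      · simp [List.sum_append]; ring
      · simp only [List.countP_cons, List.countP_append, List.countP_nil, decide_eq_true_eq]
        split_ifs <;> push_cast <;> omega
    · -- window still growing: nothing leaves
      have hnge : ¬ ((0 : Int) + (m : Int) ≥ (k' : Int)) := by omega
      have hz : m - k' = 0 := by omega
      have hz1 : m + 1 - k' = 0 := by omega
      simp only [List.foldl_cons, List.foldl_nil, bStep, if_neg hnge, hz, hz1,
        List.drop_zero]
      by_cases hfull : m + 1 = k'
      · have hge1 : (0 : Int) + (m : Int) ≥ (k' : Int) - 1 := by omega
        have hbigm : bigB nums k' m = none := by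
          unfold bigB
          have he : m + 1 - k' = 0 := by omega
          rw [he]; rfl
        have hbig1 : bigB nums k' (m + 1) = stepA none (nums.take m ++ [nums[m]]) := by
          unfold bigB
          have he : m + 1 + 1 - k' = 1 := by omega
          rw [he, List.range_one, List.foldl_cons, List.foldl_nil, List.drop_zero, ← hfull, htake]
        simp only [hbigm, hbig1]
        rw [← update_eq]
        rw [Prod.mk.injEq, Prod.mk.injEq]
        refine ⟨?_, ?_, ?_⟩
        · simp only [List.countP_cons, List.countP_append, List.sum_cons, List.sum_append,
            List.countP_nil, List.sum_nil, decide_eq_true_eq, hge1, true_and]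
          split_ifs <;> first
            | rfl
            | (exfalso; omega)
            | (simp only [Option.some.injEq]; push_cast; ring)
        · rw [List.sum_append]; simp
        · simp only [List.countP_cons, List.countP_append, List.countP_nil, decide_eq_true_eq]
          split_ifs <;> push_cast <;> omega
      · have hnge1 : ¬ ((0 : Int) + (m : Int) ≥ (k' : Int) - 1) := by omega
        have hbig : bigB nums k' (m + 1) = bigB nums k' m := by
          unfold bigB
          have h1 : m + 1 - k' = 0 := by omega
          have h2 : m + 1 + 1 - k' = 0 := by omega
          rw [h1, h2]
        simp only [hbig]
        rw [Prod.mk.injEq, Prod.mk.injEq]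
        refine ⟨by simp only [hnge1, false_and, if_false], by rw [List.sum_append]; simp, ?_⟩
        simp only [List.countP_cons, List.countP_append, List.countP_nil, decide_eq_true_eq]
        split_ifs <;> push_cast <;> omega

theorem A_eq (nums : List Int) (k' : Nat) (hk : 1 ≤ k') :
    max_subbary_sum nums (k' : Int) = bigB nums k' nums.length := by
  unfold max_subbary_sum bigB
  show List.foldl
      (fun max_sum i => stepA max_sum (PySem.List.slice nums (some i) (some (i + (k' : Int)))))
      none (PySem.List.pyRange 0 ((nums.length : Int) - (k' : Int) + 1) 1) = _
  have h1 : (((nums.length : Int)) - (k' : Int) + 1 - 0).toNat = nums.length + 1 - k' := by omega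
  rw [PySem.List.pyRange_one, List.foldl_map, h1]
  congr 1
  funext b j
  simp only [zero_add]
  rw [PySem.List.slice_natCast_add]

-- ===== VERDICT (by name: the statement is the Claim_ definition above) =====
theorem max_subbary_sum_spec : Claim_equal_max_subbary_sum := by
  intro nums k _ hpre
  unfold Spec_max_subbary_sum
  unfold Pre_max_subbary_sum at hpre
  have hk : k = ((k.toNat : Nat) : Int) := by omega
  have hk1 : 1 ≤ k.toNat := by omega
  rw [hk, A_eq nums k.toNat hk1]
  unfold max_subbary_sum_alt
  have h := invariant nums k.toNat hk1 nums.length le_rfl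
  simp only [List.take_length] at h
  rw [h]
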